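-- pv_equiv track=rewrite | github.com/TeleTobyAU/Bachelor | python/SuffixArrayGenerator.py | LSTypes
-- ===== SOURCE A (Python) =====
-- def LSTypes(n):
--     outString = "S"
--     inString = n[::-1]
--     for i in range(1, len(n)):
--         if inString[i - 1] == inString[i]:
--             outString += outString[i - 1]
--         else:
--             if inString[i - 1] < inString[i]:
--                 outString += "L"
--             else:
--                 outString += "S"
--     outString = outString[::-1]
--
--     return outString
-- ===== SOURCE B (Python) =====
-- def LSTypes(n):
--     m = len(n)
--     out = []
--     i = 0
--     while i < m:
--         j = i + 1
--         while j < m and n[j] == n[i]: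
--             j += 1
--         t = "L" if j < m and n[i] > n[j] else "S"
--         out.append(t * (j - i))
--         i = j
--     return "".join(out)
-- ===== Notes on version B (the rewrite author's own statement) =====
-- stated objective: alternative
-- what changed: B is a forward two-pointer run scan: it walks the original string left to right, finds each maximal run of equal characters with an inner pointer, decides one type per run by comparing the run character with the first character after the run ('S' for the final run), and emits the type repeated run-length times; A instead reverses the input and grows the output one character at a time with a recurrence reading its own previous output, then reverses it back.
-- intended difference: On the empty string A returns its seed accumulator 'S', a type string of length 1, while B returns the empty string, the natural L/S-type string of an empty input. — e.g. on LSTypes(""): A returns "S", B returns ""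
import Mathlib
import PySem

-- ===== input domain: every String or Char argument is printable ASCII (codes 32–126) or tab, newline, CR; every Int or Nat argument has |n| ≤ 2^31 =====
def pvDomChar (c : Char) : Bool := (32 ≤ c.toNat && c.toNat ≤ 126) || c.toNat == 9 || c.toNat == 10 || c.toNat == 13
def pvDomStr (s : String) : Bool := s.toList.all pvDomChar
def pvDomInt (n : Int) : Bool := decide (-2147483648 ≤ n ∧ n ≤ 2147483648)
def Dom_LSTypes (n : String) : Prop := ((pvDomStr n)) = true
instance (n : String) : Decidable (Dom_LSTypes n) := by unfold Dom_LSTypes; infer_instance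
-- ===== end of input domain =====

-- B is a forward two-pointer run scan (one type decision per maximal run of equal
-- characters), instead of A's reverse-input / per-character recurrence / reverse-output
-- scheme (objective: alternative).

-- ===== PORT A =====
def LSTypes (n : String) : String :=
  let inString : List Char := n.toList.reverse   -- n[::-1]
  let outString : List Char :=
    (PySem.List.pyRange 1 (PySem.Str.len n)).foldl
      (fun outString i =>
        if PySem.List.pyGetD inString (i - 1) ' ' == PySem.List.pyGetD inString i ' ' then
          outString ++ [PySem.List.pyGetD outString (i - 1) ' ']
        else if PySem.List.pyGetD inString (i - 1) ' ' < PySem.List.pyGetD inString i ' ' then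
          outString ++ ['L']
        else
          outString ++ ['S'])
      ['S']
  String.ofList outString.reverse               -- outString[::-1]

-- ===== PORT B =====
-- Source B's nested while loops, as one structural scan: altGo carries the current run
-- character c and the count k of extra equal characters seen so far (the inner while's
-- j - i - 1); on a mismatch it emits the run's type repeated j - i times and restarts,
-- at the end the final run is all 'S' (exact transliteration of the two-pointer scan).
def altGo (c : Char) (k : Nat) : List Char → List Char
  | [] => List.replicate (k + 1) 'S'
  | d :: rest =>
      if d == c then altGo c (k + 1) rest
      else List.replicate (k + 1) (if d < c then 'L' else 'S') ++ altGo d 0 rest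

def altScan : List Char → List Char
  | [] => []
  | c :: cs => altGo c 0 cs

def LSTypes_alt (n : String) : String :=
  String.ofList (altScan n.toList)                    -- "".join(out)

-- ===== PRECONDITION & SPEC =====
-- On the empty string A returns its seed accumulator "S", a type string of length 1, while B
-- returns the empty string, the natural L/S-type string of an empty input.
def D_LSTypes (n : String) : Prop := n = ""
instance (n : String) : Decidable (D_LSTypes n) := by unfold D_LSTypes; infer_instance

def Spec_LSTypes (n : String) (out : String) : Prop := ¬ D_LSTypes n → out = LSTypes_alt n
instance (n : String) (out : String) : Decidable (Spec_LSTypes n out) := by unfold Spec_LSTypes; infer_instance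

def pvDiffWitness_LSTypes : String := ""
def pvDiffWitnessOut_LSTypes : String × String := ("S", "")

-- ===== CLAIM (what is proved, stated in full; the proofs are below) =====
def Claim_unchanged_LSTypes : Prop := ∀ (n : String), Dom_LSTypes n → Spec_LSTypes n (LSTypes n)
def Claim_changed_LSTypes : Prop := Dom_LSTypes (pvDiffWitness_LSTypes) ∧ D_LSTypes (pvDiffWitness_LSTypes) ∧ LSTypes (pvDiffWitness_LSTypes) = pvDiffWitnessOut_LSTypes.1 ∧ LSTypes_alt (pvDiffWitness_LSTypes) = pvDiffWitnessOut_LSTypes.2 ∧ pvDiffWitnessOut_LSTypes.1 ≠ pvDiffWitnessOut_LSTypes.2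
def Claim_exact_LSTypes : Prop := ∀ (n : String), Dom_LSTypes n → D_LSTypes n → LSTypes n ≠ LSTypes_alt n

-- ===== LEMMAS AND PROOFS =====

-- the branch of A's loop body, as a function of (previous char, current char, previous type)
def pvG (p c t : Char) : Char := if p == c then t else if p < c then 'L' else 'S'

-- forward scan along the reversed string, as A computes it
def pvScanT (p t : Char) : List Char → List Char
  | [] => []
  | c :: cs => pvG p c t :: pvScanT c (pvG p c t) cs

-- the full forward type list of a (reversed) string
def pvFullT : List Char → List Char
  | [] => []
  | c :: cs => 'S' :: pvScanT c 'S' cs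

-- backward (structural) type list of the original string: the common characterisation
def pvTypesB : List Char → List Char
  | [] => []
  | [_] => ['S']
  | a :: b :: rest =>
      (if b < a then 'L' else if a == b then (pvTypesB (b :: rest)).headD 'S' else 'S')
        :: pvTypesB (b :: rest)

theorem pvTypesB_cons_cons (a b : Char) (rest : List Char) :
    pvTypesB (a :: b :: rest) =
      (if b < a then 'L' else if a == b then (pvTypesB (b :: rest)).headD 'S' else 'S')
        :: pvTypesB (b :: rest) := rfl

theorem pvScanT_length (p t : Char) (xs : List Char) : (pvScanT p t xs).length = xs.length := by
  induction xs generalizing p t with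
  | nil => rfl
  | cons c cs ih => simp [pvScanT, ih]

theorem pvTypesB_length (xs : List Char) : (pvTypesB xs).length = xs.length := by
  induction xs with
  | nil => rfl
  | cons a l ih =>
    cases l with
    | nil => rfl
    | cons b rest => simp [pvTypesB] at ih ⊢; omega

theorem pvScanT_append (p t y : Char) (xs : List Char) :
    pvScanT p t (xs ++ [y]) =
      pvScanT p t xs ++ [pvG ((p :: xs).getLastD ' ') y ((t :: pvScanT p t xs).getLastD ' ')] := by
  induction xs generalizing p t with
  | nil => simp [pvScanT]
  | cons x xs' ih =>
    simp only [List.cons_append, pvScanT, ih, List.getLastD_cons]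

-- getLastD of a (j+1)-prefix is the j-th element
theorem pvTake_getLastD (l : List Char) (j : Nat) (d : Char) (h : j < l.length) :
    (l.take (j + 1)).getLastD d = l.getD j d := by
  rw [List.getLastD_eq_getLast?, List.getLast?_eq_getElem?, List.length_take]
  have hmin : min (j + 1) l.length - 1 = j := by omega
  rw [hmin, List.getElem?_take, if_pos (by omega), List.getD_eq_getElem?_getD]

-- last element written as getD at (length - 1)
theorem pvGetD_last (l : List Char) (d : Char) :
    l.getD (l.length - 1) d = l.getLastD d := by
  rw [List.getD_eq_getElem?_getD, List.getLastD_eq_getLast?, List.getLast?_eq_getElem?]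

-- nonempty lists ignore the headD default
theorem pvHeadD_irrel (l : List Char) (d d' : Char) (h : l ≠ []) :
    l.headD d = l.headD d' := by
  cases l with
  | nil => exact absurd rfl h
  | cons a l' => rfl

-- the A-side loop invariant
theorem pvFoldA (c : Char) (cs : List Char) (j : Nat) (hj : j ≤ cs.length) :
    (PySem.List.pyRange 1 ((j : Int) + 1)).foldl
      (fun outString i =>
        if PySem.List.pyGetD (c :: cs) (i - 1) ' ' == PySem.List.pyGetD (c :: cs) i ' ' then
          outString ++ [PySem.List.pyGetD outString (i - 1) ' ']
        else if PySem.List.pyGetD (c :: cs) (i - 1) ' ' < PySem.List.pyGetD (c :: cs) i ' ' then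
          outString ++ ['L']
        else
          outString ++ ['S'])
      ['S'] = 'S' :: pvScanT c 'S' (cs.take j) := by
  induction j with
  | zero =>
    rw [PySem.List.pyRange_one_eq_nil (by norm_num)]
    simp [pvScanT]
  | succ j ih =>
    have hj' : j ≤ cs.length := by omega
    have hlt : j < cs.length := by omega
    have hrange : PySem.List.pyRange 1 (((j + 1 : Nat) : Int) + 1)
        = PySem.List.pyRange 1 ((j : Int) + 1) ++ [(j : Int) + 1] := by
      have h1 : (((j + 1 : Nat) : Int) + 1) = ((j : Int) + 1) + 1 := by push_cast; ring
      rw [h1, PySem.List.pyRange_one_succ_right (by omega)]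
    rw [hrange, List.foldl_append, ih hj']
    simp only [List.foldl_cons, List.foldl_nil]
    have e1 : ((j : Int) + 1 - 1) = ((j : Nat) : Int) := by ring
    have e2 : ((j : Int) + 1) = (((j + 1 : Nat) : Int)) := by push_cast; ring
    rw [e1, e2, PySem.List.pyGetD_natCast, PySem.List.pyGetD_natCast, PySem.List.pyGetD_natCast]
    have htake : cs.take (j + 1) = cs.take j ++ [cs.getD j ' '] := by
      rw [List.getD_eq_getElem cs ' ' hlt]
      rw [List.take_add_one, List.getElem?_eq_getElem hlt]
      rfl
    have hprev : (c :: cs.take j).getLastD ' ' = (c :: cs).getD j ' ' := by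
      have h := pvTake_getLastD (c :: cs) j ' ' (by simp; omega)
      rw [List.take_succ_cons] at h
      exact h
    have hcur : cs.getD j ' ' = (c :: cs).getD (j + 1) ' ' := by
      simp
    have hpt : ('S' :: pvScanT c 'S' (cs.take j)).getLastD ' '
        = ('S' :: pvScanT c 'S' (cs.take j)).getD j ' ' := by
      have hacclen : ('S' :: pvScanT c 'S' (cs.take j)).length = j + 1 := by
        simp [pvScanT_length]; omega
      have h := pvGetD_last ('S' :: pvScanT c 'S' (cs.take j)) ' '
      rw [hacclen] at h
      simpa using h.symm
    rw [htake, pvScanT_append, List.cons_append]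
    have hel : (if (c :: cs).getD j ' ' == (c :: cs).getD (j + 1) ' ' then
          ('S' :: pvScanT c 'S' (cs.take j)).getD j ' '
        else if (c :: cs).getD j ' ' < (c :: cs).getD (j + 1) ' ' then 'L' else 'S')
        = pvG ((c :: cs.take j).getLastD ' ') (cs.getD j ' ')
            (('S' :: pvScanT c 'S' (cs.take j)).getLastD ' ') := by
      unfold pvG
      rw [hprev, hcur, hpt]
    rw [← hel]
    split_ifs <;> simp

-- A in closed form on nonempty input
theorem pvA_eq (n : String) (h : n.toList ≠ []) :
    LSTypes n = String.ofList (pvFullT n.toList.reverse).reverse := by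
  unfold LSTypes
  cases hr : n.toList.reverse with
  | nil => exact absurd (List.reverse_eq_nil_iff.mp hr) h
  | cons c cs =>
    have hlen : PySem.Str.len n = ((cs.length : Int) + 1) := by
      rw [PySem.Str.len_eq]
      have h2 : n.toList.length = n.toList.reverse.length := by simp
      rw [h2, hr]
      simp
    simp only [hlen, pvFullT]
    have h3 := pvFoldA c cs cs.length (le_refl _)
    rw [List.take_length] at h3
    exact congrArg (fun l => String.ofList l.reverse) h3

-- the bridge: the structural characterisation is the reverse of A's forward types of the reversed string
theorem pvBridge (l : List Char) : pvTypesB l = (pvFullT l.reverse).reverse := by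
  induction l with
  | nil => rfl
  | cons a l' ih =>
    cases hl' : l' with
    | nil => rfl
    | cons b rest =>
      rw [← hl']
      have hrev : (a :: l').reverse = l'.reverse ++ [a] := by simp
      have hne : l'.reverse ≠ [] := by simp [hl']
      cases hr : l'.reverse with
      | nil => exact absurd hr hne
      | cons c cs =>
        have hfull : pvFullT ((a :: l').reverse) = 'S' :: pvScanT c 'S' (cs ++ [a]) := by
          rw [hrev, hr]
          rfl
        rw [hfull, pvScanT_append]
        have hfl' : pvFullT l'.reverse = 'S' :: pvScanT c 'S' cs := by rw [hr]; rfl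
        have hTne : pvTypesB l' ≠ [] := by
          intro hc
          have hlc := congrArg List.length hc
          rw [pvTypesB_length] at hlc
          simp [hl'] at hlc
        have hX : (c :: cs).getLastD ' ' = b := by
          have h1 : (c :: cs).getLastD ' ' = l'.reverse.getLastD ' ' := by rw [hr]
          rw [h1, List.getLastD_eq_getLast?, List.getLast?_reverse, hl']
          rfl
        have hT : ('S' :: pvScanT c 'S' cs).getLastD ' ' = (pvTypesB l').headD ' ' := by
          rw [← hfl', ih, List.getLastD_eq_getLast?, List.headD_eq_head?, List.head?_reverse]
        rw [hX, hT, ← List.cons_append, List.reverse_append]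
        simp only [List.reverse_singleton, List.singleton_append]
        rw [← hfl', ← ih, hl', pvTypesB_cons_cons, ← hl']
        congr 1
        unfold pvG
        by_cases hba : b < a
        · have hne2 : ¬ (b == a) := by
            intro hc
            rw [beq_iff_eq] at hc
            subst hc
            exact lt_irrefl b hba
          simp [hne2, hba]
        · by_cases hab : a == b
          · have hba' : b == a := by
              rw [beq_iff_eq] at hab ⊢
              exact hab.symm
            rw [if_pos hba', if_neg hba, if_pos hab]
            exact (pvHeadD_irrel _ ' ' 'S' hTne).symm
          · have hba' : ¬ (b == a) := by
              intro hc
              rw [beq_iff_eq] at hc hab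
              exact hab hc.symm
            simp [hba', hba, hab]

-- ===== B-side: the run scan matches the structural characterisation =====

-- the type B assigns to a whole run of character c followed by rest
def pvTOf (c : Char) : List Char → Char
  | [] => 'S'
  | d :: _ => if d < c then 'L' else 'S'

-- a maximal run of equal characters all carries the type decided at its end
theorem pvRun (k : Nat) (c : Char) (rest : List Char) (h : rest.head? ≠ some c) :
    pvTypesB (List.replicate (k + 1) c ++ rest)
      = List.replicate (k + 1) (pvTOf c rest) ++ pvTypesB rest := by
  induction k with
  | zero =>
    cases rest with
    | nil => rfl
    | cons d r =>
      have hcd : (c == d) = false := by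
        rw [beq_eq_false_iff_ne]
        intro hc
        exact h (by rw [hc]; rfl)
      show pvTypesB (c :: d :: r) = pvTOf c (d :: r) :: pvTypesB (d :: r)
      rw [pvTypesB_cons_cons]
      simp only [hcd, Bool.false_eq_true, if_false, pvTOf]
  | succ k ih =>
    have hstep : List.replicate (k + 1 + 1) c ++ rest
        = c :: (List.replicate (k + 1) c ++ rest) := by
      rw [List.replicate_succ]
      rfl
    have hinner : List.replicate (k + 1) c ++ rest
        = c :: (List.replicate k c ++ rest) := by
      rw [List.replicate_succ]
      rfl
    rw [hstep, hinner, pvTypesB_cons_cons, ← hinner, ih]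
    have hlt : ¬ (c < c) := lt_irrefl c
    have heq : (c == c) = true := beq_self_eq_true c
    rw [if_neg hlt, if_pos heq]
    have hhead : (List.replicate (k + 1) (pvTOf c rest) ++ pvTypesB rest).headD 'S'
        = pvTOf c rest := by
      rw [List.replicate_succ]
      rfl
    rw [hhead]
    rfl

-- the scanner's invariant: a pending run of k+1 copies of c, then the unscanned suffix
theorem altGo_eq (rest : List Char) : ∀ (c : Char) (k : Nat),
    altGo c k rest = pvTypesB (List.replicate (k + 1) c ++ rest) := by
  induction rest with
  | nil =>
    intro c k
    have h := pvRun k c [] (by simp)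
    rw [altGo, h]
    simp [pvTOf, pvTypesB]
  | cons d r ih =>
    intro c k
    rw [altGo]
    by_cases hdc : d == c
    · rw [if_pos hdc, ih c (k + 1)]
      have hde : d = c := beq_iff_eq.mp hdc
      subst hde
      congr 1
      rw [List.replicate_succ']
      simp
    · rw [if_neg hdc, ih d 0]
      have hhead : (d :: r).head? ≠ some c := by
        intro hc
        simp only [List.head?_cons, Option.some.injEq] at hc
        exact hdc (beq_iff_eq.mpr hc)
      rw [pvRun k c (d :: r) hhead]
      rfl

-- B's run scan computes the structural type list
theorem altScan_eq (l : List Char) : altScan l = pvTypesB l := by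
  cases l with
  | nil => rfl
  | cons c cs =>
    rw [altScan, altGo_eq cs c 0]
    congr 1

-- B in closed form
theorem pvB_eq (n : String) : LSTypes_alt n = String.ofList (pvTypesB n.toList) := by
  unfold LSTypes_alt
  rw [altScan_eq]

-- ===== VERDICT =====
theorem LSTypes_spec : Claim_unchanged_LSTypes := by
  intro n _ hD
  have hne : n.toList ≠ [] := by
    intro hc
    exact hD (String.ext (by simp [hc]))
  rw [pvA_eq n hne, pvB_eq n, pvBridge]

theorem LSTypes_changed : Claim_changed_LSTypes := by unfold Claim_changed_LSTypes; decide

theorem LSTypes_tight : Claim_exact_LSTypes := by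
  intro n _ hD
  unfold D_LSTypes at hD
  subst hD
  decide
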